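-- pv_equiv track=rewrite | github.com/qdef/Algorithms | Pylones.py | vision
-- ===== SOURCE A (Python) =====
-- def vision(L, x):
--         total = 0
--         if x > 0:
--                 total+=1
--                 maxi = L[x-1]
--                 for j in L[x-1::-1]:
--                         if j > maxi:
--                                 total+=1
--                                 maxi = j
--         if x < len(L)-1:
--                 total+=1
--                 maxi = L[x+1]
--                 for i in L[x+1:]:
--                         if i > maxi:
--                                 total+=1
--                                 maxi = i
--         return total
-- ===== SOURCE B (Python) =====
-- def vision(L, x):
--     # Different algorithm: instead of tracking a running maximum, build the
--     # actual list of visible towers on each side with a monotonic stack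
--     # (scanning the side's slice from its far end, popping towers hidden by a
--     # nearer tower of at least equal height), then return the total count.
--     def visible(seg):
--         stack = []
--         for v in reversed(seg):
--             while stack and stack[-1] <= v:
--                 stack.pop()
--             stack.append(v)
--         stack.reverse()
--         return stack
--
--     left = len(visible(L[x - 1::-1])) if x > 0 else 0
--     right = len(visible(L[x + 1:])) if x < len(L) - 1 else 0
--     return left + right
-- ===== Notes on version B (the rewrite author's own statement) =====
-- stated objective: alternative
-- what changed: Replaces A's running-maximum counter loops by a monotonic-stack algorithm that materializes the list of visible towers on each side (scanning the side from its far end and popping hidden towers) and sums the two list lengths.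
import Mathlib
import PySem

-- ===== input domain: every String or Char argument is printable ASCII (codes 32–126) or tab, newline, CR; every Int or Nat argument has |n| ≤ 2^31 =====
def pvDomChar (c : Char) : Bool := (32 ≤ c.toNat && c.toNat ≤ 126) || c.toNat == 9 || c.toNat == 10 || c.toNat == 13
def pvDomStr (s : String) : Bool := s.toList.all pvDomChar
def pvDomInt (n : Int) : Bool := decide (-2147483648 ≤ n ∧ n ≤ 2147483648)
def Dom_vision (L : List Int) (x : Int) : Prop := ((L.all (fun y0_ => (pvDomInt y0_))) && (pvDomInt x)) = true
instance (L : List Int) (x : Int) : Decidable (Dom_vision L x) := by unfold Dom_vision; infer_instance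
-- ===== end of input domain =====

-- B replaces A's running-maximum counters by a monotonic-stack construction of the
-- list of visible towers per side (objective: alternative algorithm, same O(n) cost).


-- ===== PORT A =====
-- literal transliteration of A; L[x-1] / L[x+1] are `pyGet?` (none = IndexError,
-- excluded by Pre_vision, so the `getD 0` default is never reached inside Pre_).
def vision (L : List Int) (x : Int) : Int :=
  let total : Int := 0
  let total :=
    if x > 0 then
      let maxi := (PySem.List.pyGet? L (x - 1)).getD 0
      let seg := (PySem.List.slice? L (some (x - 1)) none (-1)).getD []   -- L[x-1::-1]
      (seg.foldl (fun (st : Int × Int) j =>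
        if j > st.2 then (st.1 + 1, j) else st) (total + 1, maxi)).1
    else total
  if x < (L.length : Int) - 1 then
    let maxi := (PySem.List.pyGet? L (x + 1)).getD 0
    let seg := PySem.List.slice L (some (x + 1)) none                     -- L[x+1:]
    (seg.foldl (fun (st : Int × Int) i =>
      if i > st.2 then (st.1 + 1, i) else st) (total + 1, maxi)).1
  else total

-- ===== PORT B =====
-- the inner `while stack and stack[-1] <= v: stack.pop()` loop (stack top = list head)
def visionPop (v : Int) : List Int → List Int
  | [] => []
  | t :: rest => if t ≤ v then visionPop v rest else t :: rest

-- Source B's `visible`: fold over reversed(seg) pushing v after popping; final reverse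
def visionVisible (seg : List Int) : List Int :=
  (seg.reverse.foldl (fun stack v => v :: visionPop v stack) []).reverse

def vision_alt (L : List Int) (x : Int) : Int :=
  let left : Int :=
    if x > 0 then
      ((visionVisible ((PySem.List.slice? L (some (x - 1)) none (-1)).getD [])).length : Int)
    else 0
  let right : Int :=
    if x < (L.length : Int) - 1 then
      ((visionVisible (PySem.List.slice L (some (x + 1)) none)).length : Int)
    else 0
  left + right

-- ===== PRECONDITION & SPEC =====
-- Pre_ is exactly A's return domain: it excludes only the inputs on which the
-- indexing L[x-1] (resp. L[x+1]) raises IndexError.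
def Pre_vision (L : List Int) (x : Int) : Prop :=
  (x > 0 → x - 1 < (L.length : Int)) ∧ (x < (L.length : Int) - 1 → -(L.length : Int) ≤ x + 1)
instance (L : List Int) (x : Int) : Decidable (Pre_vision L x) := by
  unfold Pre_vision; infer_instance

def pvWitness_vision : List Int × Int := ([3, 1, 4, 1, 5], 2)

def Spec_vision (L : List Int) (x : Int) (out : Int) : Prop := out = vision_alt L x
instance (L : List Int) (x : Int) (out : Int) : Decidable (Spec_vision L x out) := by
  unfold Spec_vision; infer_instance

-- ===== CLAIM (what is proved, stated in full; the proofs are below) =====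
def Claim_equal_vision : Prop :=
  ∀ (L : List Int) (x : Int), Dom_vision L x → Pre_vision L x → Spec_vision L x (vision L x)

-- ===== LEMMAS AND PROOFS =====

-- abstract record-count of a side, used to relate the two loop shapes
def visionRecs (m : Int) : List Int → Int
  | [] => 0
  | v :: r => if v > m then 1 + visionRecs v r else visionRecs m r

-- the stack built by Source B's fold, as a structural recursion (head = nearest tower)
def visionStairs : List Int → List Int
  | [] => []
  | v :: r => v :: visionPop v (visionStairs r)

theorem visionFoldA (seg : List Int) : ∀ (t m : Int),
    (seg.foldl (fun (st : Int × Int) j =>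
      if j > st.2 then (st.1 + 1, j) else st) (t, m)).1 = t + visionRecs m seg := by
  induction seg with
  | nil => intro t m; simp [visionRecs]
  | cons v r ih =>
    intro t m
    simp only [List.foldl_cons, visionRecs]
    by_cases h : v > m
    · simp [h, ih]; ring
    · simp [h, ih]

theorem visionVisible_eq_stairs (seg : List Int) :
    seg.reverse.foldl (fun stack v => v :: visionPop v stack) [] = visionStairs seg := by
  induction seg with
  | nil => rfl
  | cons v r ih => simp [List.foldl_append, ih, visionStairs]

theorem visionPop_pop (v m : Int) (hvm : v ≤ m) :
    ∀ s : List Int, visionPop m (visionPop v s) = visionPop m s := by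
  intro s
  induction s with
  | nil => rfl
  | cons t rest ih =>
    by_cases h : t ≤ v
    · simp [visionPop, h, le_trans h hvm, ih]
    · simp [visionPop, h]

theorem visionPop_stairs_length : ∀ (r : List Int) (m : Int),
    ((visionPop m (visionStairs r)).length : Int) = visionRecs m r := by
  intro r
  induction r with
  | nil => intro m; simp [visionStairs, visionPop, visionRecs]
  | cons v r' ih =>
    intro m
    by_cases h : v ≤ m
    · have hnot : ¬ v > m := not_lt.mpr h
      simp only [visionStairs, visionPop, if_pos h, visionRecs, if_neg hnot,
        visionPop_pop v m h, ih]
    · have hgt : v > m := lt_of_not_ge h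
      simp only [visionStairs, visionPop, if_neg h, visionRecs, if_pos hgt]
      simp [← ih v]
      ring

-- side equality: A's loop started at (t+1, m) over a side whose first element is m
-- adds the number of visible towers Source B computes for that side
theorem visionSide (t m : Int) (rest : List Int) :
    ((m :: rest).foldl (fun (st : Int × Int) j =>
      if j > st.2 then (st.1 + 1, j) else st) (t + 1, m)).1
    = t + ((visionVisible (m :: rest)).length : Int) := by
  have h1 : ((m :: rest).foldl (fun (st : Int × Int) j =>
      if j > st.2 then (st.1 + 1, j) else st) (t + 1, m)) =
      (rest.foldl (fun (st : Int × Int) j =>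
      if j > st.2 then (st.1 + 1, j) else st) (t + 1, m)) := by
    simp [List.foldl_cons]
  rw [h1, visionFoldA rest (t + 1) m]
  unfold visionVisible
  rw [visionVisible_eq_stairs]
  simp only [List.length_reverse, visionStairs, List.length_cons]
  rw [← visionPop_stairs_length rest m]
  push_cast
  ring

theorem visionSliceRev_key (L : List Int) : ∀ (n : Nat), n < L.length →
    List.filterMap (fun k : Nat => L[(((n : Nat) : Int) + -1 * ((k : Nat) : Int)).toNat]?)
        (List.range (n + 1))
      = (L.take (n + 1)).reverse := by
  intro n
  induction n with
  | zero =>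
    intro h
    simp [List.range_succ, List.take_add_one, List.getElem?_eq_getElem h]
  | succ m ih =>
    intro h
    rw [List.range_succ_eq_map, List.filterMap_cons, List.filterMap_map]
    have hfun : ((fun k : Nat => L[((((m+1) : Nat) : Int) + -1 * ((k : Nat) : Int)).toNat]?) ∘ (· + 1))
        = (fun k : Nat => L[(((m : Nat) : Int) + -1 * ((k : Nat) : Int)).toNat]?) := by
      funext k
      simp only [Function.comp]
      congr 1
      push_cast
      omega
    rw [hfun, ih (by omega)]
    have h0 : ((((m+1) : Nat) : Int) + -1 * (((0:Nat)) : Int)).toNat = m + 1 := by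
      push_cast; omega
    rw [h0, List.getElem?_eq_getElem h]
    show L[m+1] :: (List.take (m + 1) L).reverse = (List.take (m + 1 + 1) L).reverse
    have hsplit : List.take (m + 1 + 1) L = List.take (m + 1) L ++ [L[m + 1]] := by
      rw [List.take_add_one]
      simp [List.getElem?_eq_getElem h]
    rw [hsplit, List.reverse_append]
    simp
-- characterisation of the slice L[x-1::-1] for an in-range nonnegative start
theorem visionSliceRev (L : List Int) (a : Nat) (h : a < L.length) :
    PySem.List.slice? L (some (a : Int)) none (-1) = some ((L.take (a + 1)).reverse) := by
  unfold PySem.List.slice? PySem.List.sliceIndices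
  norm_num
  have hmin : min ((a : Nat) : Int) ((L.length : Int) - 1) = ((a : Nat) : Int) := by omega
  rw [hmin]
  have h1 : ¬ (((a : Nat) : Int) < 0) := by omega
  simp only [if_neg h1]
  have h3 : (-1 : Int) < ((a : Nat) : Int) := by omega
  simp only [if_pos h3]
  have hcnt : (((a : Nat) : Int) + 1).toNat = a + 1 := by omega
  rw [hcnt, ← visionSliceRev_key L a h]
  exact List.filterMap_congr (fun k hk => by congr 1; omega)

-- the first element of L[x-1::-1] is L[x-1]
theorem visionSliceRevHead (L : List Int) (a : Nat) (h : a < L.length) :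
    ((L.take (a + 1)).reverse).head? = PySem.List.pyGet? L (a : Int) := by
  rw [PySem.List.pyGet?_natCast, List.head?_reverse, List.getLast?_eq_getElem?]
  have hl : (L.take (a + 1)).length = a + 1 := by
    simp [List.length_take]; omega
  rw [hl]
  simp only [Nat.add_sub_cancel]
  rw [List.getElem?_take_of_lt (by omega)]

-- the first element of L[i:] is L[i] for an in-range i
theorem visionSliceFromHead (L : List Int) (i : Int) (h1 : -(L.length : Int) ≤ i)
    (h2 : i < (L.length : Int)) :
    (PySem.List.slice L (some i) none).head? = PySem.List.pyGet? L i := by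
  rw [PySem.List.slice_some_none, List.head?_drop]
  by_cases h0 : 0 ≤ i
  · have hi : i = ((i.toNat : Nat) : Int) := by omega
    rw [hi, PySem.List.clampIdx_natCast, PySem.List.pyGet?_natCast]
    congr 1
    omega
  · have hk : i = -(((-i).toNat : Nat) : Int) := by omega
    have hkpos : 0 < (-i).toNat := by omega
    have hkle : (-i).toNat ≤ L.length := by omega
    rw [hk, PySem.List.clampIdx_neg_natCast _ _ hkpos,
      PySem.List.pyGet?_neg_natCast L _ hkpos hkle]

-- ===== VERDICT (by name: the statement is the Claim_ definition above) =====
theorem vision_left (L : List Int) (x : Int) (hx1 : x > 0)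
    (ha : (x - 1).toNat < L.length) :
    ∃ m rest, (PySem.List.slice? L (some (x - 1)) none (-1)).getD [] = m :: rest ∧
      PySem.List.pyGet? L (x - 1) = some m := by
  have hx1' : x - 1 = (((x - 1).toNat : Nat) : Int) := by omega
  rw [hx1', visionSliceRev L _ ha]
  have hhead := visionSliceRevHead L (x - 1).toNat ha
  cases hseg : (L.take ((x - 1).toNat + 1)).reverse with
  | nil =>
    exfalso
    have ht : L.take ((x - 1).toNat + 1) = [] := by
      have := congrArg List.reverse hseg
      simpa using this
    have h2 : min ((x - 1).toNat + 1) L.length = 0 := by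
      simpa [List.length_take] using congrArg List.length ht
    omega
  | cons m rest =>
    refine ⟨m, rest, by simp, ?_⟩
    rw [hseg] at hhead
    simp at hhead
    rw [PySem.List.pyGet?_natCast]
    have he : (x - 1).toNat = x.toNat - 1 := by omega
    rw [he]
    exact hhead.symm

theorem vision_right (L : List Int) (x : Int) (h1 : -(L.length : Int) ≤ x + 1)
    (h2 : x + 1 < (L.length : Int)) :
    ∃ m rest, PySem.List.slice L (some (x + 1)) none = m :: rest ∧
      PySem.List.pyGet? L (x + 1) = some m := by
  have hhead := visionSliceFromHead L (x + 1) h1 h2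
  cases hseg : PySem.List.slice L (some (x + 1)) none with
  | nil =>
    exfalso
    rw [hseg] at hhead
    simp at hhead
    have hh := hhead.symm
    rw [PySem.List.pyGet?_eq_none_iff] at hh
    exact hh (by simp [PySem.Raise.InRange]; omega)
  | cons m rest =>
    rw [hseg] at hhead
    simp at hhead
    exact ⟨m, rest, rfl, hhead.symm⟩

-- ===== VERDICT (by name: the statement is the Claim_ definition above) =====
theorem vision_spec : Claim_equal_vision := by
  intro L x hdom hpre
  obtain ⟨hp1, hp2⟩ := hpre
  unfold Spec_vision vision vision_alt
  by_cases hx1 : x > 0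
  · have ha : (x - 1).toNat < L.length := by have := hp1 hx1; omega
    obtain ⟨m1, r1, hseg1, hget1⟩ := vision_left L x hx1 ha
    by_cases hx2 : x < (L.length : Int) - 1
    · have hb1 : -(L.length : Int) ≤ x + 1 := hp2 hx2
      have hb2 : x + 1 < (L.length : Int) := by omega
      obtain ⟨m2, r2, hseg2, hget2⟩ := vision_right L x hb1 hb2
      simp only [if_pos hx1, if_pos hx2, hseg1, hseg2, hget1, hget2, Option.getD_some]
      rw [visionSide 0 m1 r1, zero_add]
      rw [visionSide (((visionVisible (m1 :: r1)).length : Int)) m2 r2]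
    · simp only [if_pos hx1, if_neg hx2, hseg1, hget1, Option.getD_some]
      rw [visionSide 0 m1 r1, zero_add, add_zero]
  · by_cases hx2 : x < (L.length : Int) - 1
    · have hb1 : -(L.length : Int) ≤ x + 1 := hp2 hx2
      have hb2 : x + 1 < (L.length : Int) := by omega
      obtain ⟨m2, r2, hseg2, hget2⟩ := vision_right L x hb1 hb2
      simp only [if_neg hx1, if_pos hx2, hseg2, hget2, Option.getD_some]
      rw [visionSide 0 m2 r2]
    · simp [if_neg hx1, if_neg hx2]
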